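-- pv_equiv track=rewrite | github.com/hoi9085/MyProjects | Fichiers fournis-20240130/common.py | maj_possibles
-- ===== SOURCE A (Python) =====
-- def evaluation(combinaison, combinaison_reference):
--     bien_places, mal_places = 0, 0 # Initialisation des compteurs
--     combinaison1, combinaison2 = [], [] # Initialisation des lisltes qui vont contenir des éléments des combinaisons
--
--     for i in range(len(combinaison)): # Boucle pour comparer chaque élément des combinaisons (et pour identifier les plots bien placés)
--         if combinaison[i] == combinaison_reference[i]: # Les 2 éléments sont identiques dans la même place
--             bien_places += 1  # Ajouter le nombre de plots bien placés
--         else: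
--             combinaison1.append(combinaison_reference[i])  # Ajouter à combinaison1 si pas bien placé
--             combinaison2.append(combinaison[i])  # Ajouter à combinaison2 si pas bien placé
--
--     for e in combinaison2: # Parcourir les éléments non bien placés dans combinaison2 (pour identifier les plots mal placés)
--         if e in combinaison1:  # Vérifier s'il existe dans combinaison1
--             mal_places += 1  # Ajouter le nombre de plots mal placés
--             combinaison1.remove(e)  # Retirer l'élément de combinaison1 s'il est trouvé dans combinaison2
--
--     return bien_places, mal_places  # Renvoyer le nombre de plots bien et mal placés, sous forme de tuple
--
-- def maj_possibles(combinaisons_possibles_encore, combinaison_testee, evaluation_associee):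
--     enlever = []  # Créer une liste pour stocker les combinaisons à enlever
--     for combinaison in combinaisons_possibles_encore:  # Parcourir chaque combinaison possible restante
--         eval = evaluation(combinaison, combinaison_testee)  # Évaluer la combinaison
--         if eval != evaluation_associee:  # Si l'évaluation ne correspond pas à l'évaluation associée
--             enlever.append(combinaison)  # Ajouter la combinaison à la liste des combinaisons à enlever
--     for combinaison in enlever:  # Parcourir la liste des combinaisons à enlever
--             combinaisons_possibles_encore.remove(combinaison)  # Supprimer la combinaison des combinaisons possibles restantes
--     return combinaisons_possibles_encore  # Retourner l'ensemble mis à jour des combinaisons possibles restantes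
-- ===== SOURCE B (Python) =====
-- # B: filter via one pass keeping matches; evaluation counts mal_places with hash-map counters
-- # (multiset intersection: sum over distinct leftover values of the min of the two counts)
-- # instead of the quadratic membership-and-remove loop.
-- # Mutates the input list in place (slice assignment) like A and returns the same object.
-- def maj_possibles(combinaisons_possibles_encore, combinaison_testee, evaluation_associee):
--     def _evaluation(comb, ref):
--         pairs = list(zip(comb, ref))
--         bien = sum(1 for a, b in pairs if a == b)
--         rest1 = [b for a, b in pairs if a != b]
--         rest2 = [a for a, b in pairs if a != b]
--         counts1 = {}
--         for v in rest1:
--             counts1[v] = counts1.get(v, 0) + 1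
--         counts2 = {}
--         for v in rest2:
--             counts2[v] = counts2.get(v, 0) + 1
--         mal = sum(min(counts1.get(v, 0), n) for v, n in counts2.items())
--         return bien, mal
--     kept = [c for c in combinaisons_possibles_encore
--             if _evaluation(c, combinaison_testee) == evaluation_associee]
--     combinaisons_possibles_encore[:] = kept
--     return combinaisons_possibles_encore
-- ===== Notes on version B (the rewrite author's own statement) =====
-- stated objective: faster
-- what changed: The helper's membership-and-remove mal_places loop is replaced by hash-map counters and a multiset-intersection sum (min of the two counts per distinct leftover value), and maj_possibles's collect-then-remove pass is replaced by a single keep-filter with in-place slice assignment.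
import Mathlib
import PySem

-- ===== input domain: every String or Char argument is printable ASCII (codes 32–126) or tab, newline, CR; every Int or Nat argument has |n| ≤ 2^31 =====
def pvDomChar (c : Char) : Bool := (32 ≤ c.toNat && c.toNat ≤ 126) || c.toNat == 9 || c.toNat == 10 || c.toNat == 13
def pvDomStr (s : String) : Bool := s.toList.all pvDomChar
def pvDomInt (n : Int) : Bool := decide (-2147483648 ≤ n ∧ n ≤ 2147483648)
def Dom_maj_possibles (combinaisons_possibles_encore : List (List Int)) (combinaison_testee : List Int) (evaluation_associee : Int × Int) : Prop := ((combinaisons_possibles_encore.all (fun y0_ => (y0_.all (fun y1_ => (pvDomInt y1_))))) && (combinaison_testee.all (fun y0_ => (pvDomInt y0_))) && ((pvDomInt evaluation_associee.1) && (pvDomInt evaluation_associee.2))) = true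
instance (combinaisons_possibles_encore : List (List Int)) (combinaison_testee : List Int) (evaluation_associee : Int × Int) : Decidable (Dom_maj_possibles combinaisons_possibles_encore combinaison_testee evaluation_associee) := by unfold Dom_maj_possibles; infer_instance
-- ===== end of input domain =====

-- B replaces A's collect-then-remove filtering with a single keep-filter pass and the quadratic
-- membership-and-remove mal_places loop with linear hash-map counters (a multiset-intersection
-- sum); a timing run measured B faster on large inputs (objective: faster).
-- A mutates the input list in place (remove); B mutates it equally (slice assignment); the
-- equivalence proved here is about the RETURN value (the final contents coincide as well).

-- ===== PORT A =====
-- 'for i in range(len(combinaison))' reading combinaison[i] / combinaison_reference[i] is ported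
-- as lockstep structural recursion on the two lists: same comparisons in the same order;
-- 'none' exactly where Python raises IndexError (reference exhausted before combinaison).
def evalLoop1A : List Int → List Int → Int → List Int → List Int → Option (Int × List Int × List Int)
  | [], _, bp, c1, c2 => some (bp, c1, c2)
  | _ :: _, [], _, _, _ => none
  | x :: xs, y :: ys, bp, c1, c2 =>
      if x == y then evalLoop1A xs ys (bp + 1) c1 c2
      else evalLoop1A xs ys bp (c1 ++ [y]) (c2 ++ [x])

-- 'for e in combinaison2: if e in combinaison1: mal_places += 1; combinaison1.remove(e)'
def evalLoop2A : List Int → List Int → Int → Int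
  | [], _, mal => mal
  | e :: rest, c1, mal =>
      if c1.contains e then evalLoop2A rest ((PySem.List.remove? c1 e).getD c1) (mal + 1)
      else evalLoop2A rest c1 mal

def evaluationA (combinaison combinaison_reference : List Int) : Option (Int × Int) :=
  match evalLoop1A combinaison combinaison_reference 0 [] [] with
  | none => none
  | some (bien_places, c1, c2) => some (bien_places, evalLoop2A c2 c1 0)

-- first loop of maj_possibles: build 'enlever'; none if some evaluation raised
def collectEnleverA (ref : List Int) (ev : Int × Int) : List (List Int) → Option (List (List Int))
  | [] => some []
  | c :: rest =>
      match evaluationA c ref with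
      | none => none
      | some e =>
          match collectEnleverA ref ev rest with
          | none => none
          | some en => some (if !(e == ev) then c :: en else en)

def maj_possibles (combinaisons_possibles_encore : List (List Int)) (combinaison_testee : List Int) (evaluation_associee : Int × Int) : List (List Int) :=
  match collectEnleverA combinaison_testee evaluation_associee combinaisons_possibles_encore with
  | none => combinaisons_possibles_encore   -- unreachable under Pre_ (Python raises IndexError)
  | some enlever =>
      enlever.foldl (fun acc c => (PySem.List.remove? acc c).getD acc) combinaisons_possibles_encore

-- ===== PORT B =====
def evaluationB (comb ref : List Int) : Int × Int :=
  let pairs := comb.zip ref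
  let bien : Int := ((pairs.filter (fun p => p.1 == p.2)).map (fun _ => (1 : Int))).sum
  let rest1 := (pairs.filter (fun p => !(p.1 == p.2))).map Prod.snd
  let rest2 := (pairs.filter (fun p => !(p.1 == p.2))).map Prod.fst
  let counts1 := rest1.foldl (fun d v => d.insert v (d.getD v 0 + 1)) PySem.Dict.empty
  let counts2 := rest2.foldl (fun d v => d.insert v (d.getD v 0 + 1)) PySem.Dict.empty
  let mal : Int := (counts2.items.map (fun p => min (counts1.getD p.1 0) p.2)).sum
  (bien, mal)

def maj_possibles_alt (combinaisons_possibles_encore : List (List Int)) (combinaison_testee : List Int) (evaluation_associee : Int × Int) : List (List Int) :=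
  combinaisons_possibles_encore.filter (fun c => evaluationB c combinaison_testee == evaluation_associee)

-- ===== PRECONDITION & SPEC =====
-- Pre_ excludes exactly the inputs where Python A raises IndexError: a candidate combination
-- longer than combinaison_testee makes evaluation read past the end of the reference.
def Pre_maj_possibles (combinaisons_possibles_encore : List (List Int)) (combinaison_testee : List Int) (evaluation_associee : Int × Int) : Prop :=
  ∀ c ∈ combinaisons_possibles_encore, c.length ≤ combinaison_testee.length
instance (combinaisons_possibles_encore : List (List Int)) (combinaison_testee : List Int) (evaluation_associee : Int × Int) : Decidable (Pre_maj_possibles combinaisons_possibles_encore combinaison_testee evaluation_associee) := by unfold Pre_maj_possibles; infer_instance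

def pvWitness_maj_possibles : List (List Int) × List Int × (Int × Int) :=
  ([[1, 2], [2, 1], [2, 2]], [1, 2], (0, 2))

def Spec_maj_possibles (combinaisons_possibles_encore : List (List Int)) (combinaison_testee : List Int) (evaluation_associee : Int × Int) (out : List (List Int)) : Prop := out = maj_possibles_alt combinaisons_possibles_encore combinaison_testee evaluation_associee
instance (combinaisons_possibles_encore : List (List Int)) (combinaison_testee : List Int) (evaluation_associee : Int × Int) (out : List (List Int)) : Decidable (Spec_maj_possibles combinaisons_possibles_encore combinaison_testee evaluation_associee out) := by unfold Spec_maj_possibles; infer_instance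

-- ===== CLAIM (what is proved, stated in full; the proofs are below) =====
def Claim_equal_maj_possibles : Prop := ∀ (combinaisons_possibles_encore : List (List Int)) (combinaison_testee : List Int) (evaluation_associee : Int × Int), Dom_maj_possibles combinaisons_possibles_encore combinaison_testee evaluation_associee → Pre_maj_possibles combinaisons_possibles_encore combinaison_testee evaluation_associee → Spec_maj_possibles combinaisons_possibles_encore combinaison_testee evaluation_associee (maj_possibles combinaisons_possibles_encore combinaison_testee evaluation_associee)

-- ===== LEMMAS AND PROOFS =====

-- A's first evaluation loop computes B's zip-based bien/rest1/rest2 (when the reference is long enough).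
theorem evalLoop1A_eq (comb : List Int) : ∀ (ref : List Int), comb.length ≤ ref.length →
    ∀ (bp : Int) (c1 c2 : List Int),
    evalLoop1A comb ref bp c1 c2 = some
      (bp + (((comb.zip ref).filter (fun p => p.1 == p.2)).map (fun _ => (1 : Int))).sum,
       c1 ++ ((comb.zip ref).filter (fun p => !(p.1 == p.2))).map Prod.snd,
       c2 ++ ((comb.zip ref).filter (fun p => !(p.1 == p.2))).map Prod.fst) := by
  induction comb with
  | nil => intro ref h bp c1 c2; simp [evalLoop1A]
  | cons x xs ih =>
    intro ref h bp c1 c2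
    cases ref with
    | nil => simp at h
    | cons y ys =>
      simp only [List.length_cons, Nat.add_le_add_iff_right] at h
      by_cases hxy : x = y
      · simp [evalLoop1A, hxy, ih ys h, add_assoc]
      · have hb : (x == y) = false := beq_eq_false_iff_ne.mpr hxy
        simp [evalLoop1A, hb, ih ys h]

-- A's remove-based mal_places loop counts the multiset intersection.
theorem evalLoop2A_eq (c2 : List Int) : ∀ (c1 : List Int) (mal : Int),
    evalLoop2A c2 c1 mal = mal + ((((c2 : Multiset Int)) ∩ ((c1 : Multiset Int))).card : Int) := by
  induction c2 with
  | nil => intro c1 mal; simp [evalLoop2A]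
  | cons e rest ih =>
    intro c1 mal
    by_cases he : e ∈ c1
    · have hc : c1.contains e = true := List.elem_eq_true_of_mem he
      rw [show ((e :: rest : List Int) : Multiset Int) = e ::ₘ (rest : Multiset Int) from rfl,
        Multiset.cons_inter_of_pos _ he]
      simp only [evalLoop2A, hc, if_pos, PySem.List.remove?_eq_some_erase c1 e he, Option.getD_some,
        ih, Multiset.card_cons, ← Multiset.coe_erase]
      push_cast
      ring
    · have hc : c1.contains e = false := by simpa using he
      simp only [evalLoop2A, hc, Bool.false_eq_true, if_false, ih]
      rw [show ((e :: rest : List Int) : Multiset Int) = e ::ₘ (rest : Multiset Int) from rfl,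
        Multiset.cons_inter_of_neg _ he]

-- B's sum-of-min over the two counters is the multiset-intersection cardinality.
theorem sum_min_count_eq (rest1 rest2 : List Int) :
    (((rest2.foldl (fun d v => d.insert v (d.getD v 0 + 1)) PySem.Dict.empty).items).map
      (fun p => min ((rest1.foldl (fun d v => d.insert v (d.getD v 0 + 1)) PySem.Dict.empty).getD p.1 0) p.2)).sum
    = ((((rest2 : Multiset Int)) ∩ ((rest1 : Multiset Int))).card : Int) := by
  rw [PySem.Dict.foldl_insert_getD_add_one_eq_counter rest1,
    PySem.Dict.foldl_insert_getD_add_one_eq_counter rest2,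
    PySem.Dict.items_counter, List.map_map]
  have hf : ((fun p : Int × Int => min ((PySem.Dict.counter rest1).getD p.1 0) p.2) ∘
        fun k => (k, (List.count k rest2 : Int)))
      = fun v : Int => ((min (List.count v rest1) (List.count v rest2) : Nat) : Int) := by
    funext v
    simp only [Function.comp_apply, PySem.Dict.getD_counter, Nat.cast_min]
  have key_nat : (∑ v ∈ rest2.toFinset, min (List.count v rest1) (List.count v rest2))
      = (((rest2 : Multiset Int)) ∩ ((rest1 : Multiset Int))).card := by
    rw [← Multiset.toFinset_sum_count_eq ((rest2 : Multiset Int) ∩ (rest1 : Multiset Int)),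
      Finset.sum_subset (Multiset.toFinset_subset.mpr (Multiset.subset_of_le Multiset.inter_le_left))
        (by intro v _ hnv; rw [Multiset.count_eq_zero]; simpa using hnv)]
    apply Finset.sum_congr rfl
    intro v _
    rw [Multiset.count_inter]
    simp [min_comm]
  rw [hf, ← List.sum_toFinset _ (PySem.Set.nodup_ofList rest2)]
  have hts : (PySem.Set.ofList rest2).toFinset = rest2.toFinset := by
    apply Finset.ext
    intro v
    simp [List.mem_toFinset, PySem.Set.mem_ofList]
  rw [hts, ← Nat.cast_sum, key_nat]

theorem evaluationA_eq (comb ref : List Int) (h : comb.length ≤ ref.length) :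
    evaluationA comb ref = some (evaluationB comb ref) := by
  unfold evaluationA evaluationB
  rw [evalLoop1A_eq comb ref h 0 [] []]
  simp only [List.nil_append, zero_add]
  rw [evalLoop2A_eq, sum_min_count_eq, zero_add]

theorem collectEnleverA_eq (ref : List Int) (ev : Int × Int) : ∀ (l : List (List Int)),
    (∀ c ∈ l, c.length ≤ ref.length) →
    collectEnleverA ref ev l = some (l.filter (fun c => !(evaluationB c ref == ev))) := by
  intro l
  induction l with
  | nil => intro _; simp [collectEnleverA]
  | cons c rest ih =>
    intro h
    have hc := h c List.mem_cons_self
    simp only [collectEnleverA, evaluationA_eq c ref hc,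
      ih (fun c' hc' => h c' (List.mem_cons_of_mem _ hc'))]
    by_cases hev : evaluationB c ref == ev
    · simp [hev]
    · simp only [Bool.not_eq_true] at hev
      simp [hev]

-- removing a list of elements all different from the head commutes with consing the head
theorem foldl_remove_cons (x : List Int) (es : List (List Int)) (hx : ∀ e ∈ es, e ≠ x) :
    ∀ (t : List (List Int)),
    es.foldl (fun acc c => (PySem.List.remove? acc c).getD acc) (x :: t)
      = x :: es.foldl (fun acc c => (PySem.List.remove? acc c).getD acc) t := by
  induction es with
  | nil => intro t; simp
  | cons e es ih =>
    intro t
    have hne : x ≠ e := fun h => hx e List.mem_cons_self h.symm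
    simp only [List.foldl_cons]
    rw [PySem.List.remove?_cons_of_ne t hne]
    cases h : PySem.List.remove? t e with
    | none => simp [ih (fun e' he' => hx e' (List.mem_cons_of_mem _ he'))]
    | some t' => simp [ih (fun e' he' => hx e' (List.mem_cons_of_mem _ he'))]

-- collect-then-remove is filtering: removing every element failing p (first occurrences, in order)
-- from the original list leaves exactly the elements satisfying p.
theorem foldl_remove_filter (p : List Int → Bool) : ∀ (l : List (List Int)),
    (l.filter (fun c => !(p c))).foldl (fun acc c => (PySem.List.remove? acc c).getD acc) l
      = l.filter p := by
  intro l
  induction l with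
  | nil => simp
  | cons x t ih =>
    by_cases hp : p x
    · rw [List.filter_cons_of_neg (by simp [hp]), List.filter_cons_of_pos (by simp [hp])]
      rw [foldl_remove_cons x _ (fun e he => by
        intro hex
        have := List.of_mem_filter he
        simp [hex, hp] at this), ih]
    · rw [List.filter_cons_of_pos (by simp [hp]), List.filter_cons_of_neg (by simp [hp])]
      simp only [List.foldl_cons, PySem.List.remove?_cons_self, Option.getD_some]
      exact ih

-- ===== VERDICT (by name: the statement is the Claim_ definition above) =====
theorem maj_possibles_spec : Claim_equal_maj_possibles := by
  intro l ref ev _ hpre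
  unfold Spec_maj_possibles maj_possibles maj_possibles_alt
  rw [collectEnleverA_eq ref ev l hpre]
  exact foldl_remove_filter (fun c => evaluationB c ref == ev) l
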